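-- pv_equiv track=rewrite | github.com/casperfibaek/buteo | buteo/utils/core.py | step_ranges
-- ===== SOURCE A (Python) =====
-- def step_ranges(steps):
--     start_stop = []
--     last = 0
--     for idx, step_size in enumerate(steps):
--         fid = idx + 1
--
--         start_stop.append(
--             {
--                 "id": fid,
--                 "start": last,
--                 "stop": last + step_size,
--             }
--         )
--
--         last += step_size
--
--     return start_stop
-- ===== SOURCE B (Python) =====
-- from itertools import accumulate
--
--
-- def step_ranges(steps):
--     bounds = list(accumulate(steps, initial=0))
--     return [
--         {"id": idx + 1, "start": start, "stop": stop}
--         for idx, (start, stop) in enumerate(zip(bounds, bounds[1:]))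
--     ]
-- ===== Notes on version B (the rewrite author's own statement) =====
-- stated objective: alternative
-- what changed: B precomputes the cumulative boundary table with itertools.accumulate(initial=0) and then emits one dict per adjacent pair of boundaries, instead of A's single loop that maintains a running 'last' while appending.
import Mathlib
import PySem

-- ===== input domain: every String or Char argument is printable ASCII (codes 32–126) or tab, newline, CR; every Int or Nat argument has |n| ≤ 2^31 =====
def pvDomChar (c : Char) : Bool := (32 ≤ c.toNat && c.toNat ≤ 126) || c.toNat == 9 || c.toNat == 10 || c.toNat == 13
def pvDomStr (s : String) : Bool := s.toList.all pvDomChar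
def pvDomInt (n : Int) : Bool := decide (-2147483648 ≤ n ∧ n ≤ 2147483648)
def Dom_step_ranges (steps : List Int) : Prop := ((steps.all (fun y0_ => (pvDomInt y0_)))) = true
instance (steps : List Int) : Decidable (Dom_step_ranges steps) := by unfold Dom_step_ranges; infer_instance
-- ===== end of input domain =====

-- B rebuilds the ranges from a precomputed cumulative-boundary table (accumulate + pairwise pass)
-- instead of A's single loop with a running 'last'; same cost, different decomposition.

-- ===== PORT A =====
-- A: one loop over enumerate(steps), appending a dict and updating 'last'.
def step_ranges (steps : List Int) : List (List (String × Int)) :=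
  (List.foldl
    (fun (st : List (List (String × Int)) × Int) (p : Int × Int) =>
      (st.1 ++ [[("id", p.1 + 1), ("start", st.2), ("stop", st.2 + p.2)]],
       st.2 + p.2))
    ([], 0) (PySem.List.enumerate steps)).1

-- ===== PORT B =====
-- itertools.accumulate(steps, initial=0): running sums, left to right.
def stepRangesAccumulate (acc : Int) : List Int → List Int
  | [] => [acc]
  | x :: xs => acc :: stepRangesAccumulate (acc + x) xs

def step_ranges_alt (steps : List Int) : List (List (String × Int)) :=
  let bounds := stepRangesAccumulate 0 steps
  (PySem.List.enumerate (List.zip bounds bounds.tail)).map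
    (fun p => [("id", p.1 + 1), ("start", p.2.1), ("stop", p.2.2)])

-- ===== PRECONDITION & SPEC =====
def Spec_step_ranges (steps : List Int) (out : List (List (String × Int))) : Prop := out = step_ranges_alt steps
instance (steps : List Int) (out : List (List (String × Int))) : Decidable (Spec_step_ranges steps out) := by unfold Spec_step_ranges; infer_instance

-- ===== CLAIM (what is proved, stated in full; the proofs are below) =====
def Claim_equal_step_ranges : Prop := ∀ (steps : List Int), Dom_step_ranges steps → Spec_step_ranges steps (step_ranges steps)

-- ===== LEMMAS AND PROOFS =====

-- A's loop body for reuse in lemmas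
def srStep (st : List (List (String × Int)) × Int) (p : Int × Int) :
    List (List (String × Int)) × Int :=
  (st.1 ++ [[("id", p.1 + 1), ("start", st.2), ("stop", st.2 + p.2)]], st.2 + p.2)

theorem sr_foldl_eq (steps : List Int) (i : Int) (last : Int)
    (acc : List (List (String × Int))) :
    (List.foldl srStep (acc, last) (PySem.List.enumerate steps i)).1 =
      acc ++ (PySem.List.enumerate (List.zip (stepRangesAccumulate last steps)
                (stepRangesAccumulate last steps).tail) i).map
        (fun p => [("id", p.1 + 1), ("start", p.2.1), ("stop", p.2.2)]) := by
  induction steps generalizing i last acc with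
  | nil => simp [PySem.List.enumerate_nil, stepRangesAccumulate]
  | cons x xs ih =>
      have hb : stepRangesAccumulate last (x :: xs) = last :: stepRangesAccumulate (last + x) xs := rfl
      have hhd : ∃ r, stepRangesAccumulate (last + x) xs = (last + x) :: r := by
        cases xs <;> exact ⟨_, rfl⟩
      obtain ⟨r, hr⟩ := hhd
      rw [hb, PySem.List.enumerate_cons, List.foldl_cons]
      show (List.foldl srStep (srStep (acc, last) (i, x)) (PySem.List.enumerate xs (i + 1))).1 = _
      rw [srStep, ih]
      simp [hr, PySem.List.enumerate_cons]

-- ===== VERDICT (by name: the statement is the Claim_ definition above) =====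
theorem step_ranges_spec : Claim_equal_step_ranges := by
  intro steps _
  show step_ranges steps = step_ranges_alt steps
  unfold step_ranges step_ranges_alt
  exact sr_foldl_eq steps 0 0 []
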